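-- pv_equiv track=rewrite | github.com/nripstein/video-contact-pipeline | pipeline/metrics.py | get_labels_start_end_time
-- ===== SOURCE A (Python) =====
-- from typing import Iterable, List, Sequence, Tuple
--
-- def get_labels_start_end_time(frame_wise_labels: Sequence[int], bg_class: Iterable[int] = (0,)) -> Tuple[List[int], List[int], List[int]]:
--     labels: List[int] = []
--     starts: List[int] = []
--     ends: List[int] = []
--     last_label = frame_wise_labels[0]
--     if last_label not in bg_class:
--         labels.append(last_label)
--         starts.append(0)
--     for i, label in enumerate(frame_wise_labels):
--         if label != last_label:
--             if label not in bg_class: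
--                 labels.append(label)
--                 starts.append(i)
--             if last_label not in bg_class:
--                 ends.append(i)
--             last_label = label
--     if last_label not in bg_class:
--         ends.append(i + 1)
--     return labels, starts, ends
-- ===== SOURCE B (Python) =====
-- def get_labels_start_end_time(frame_wise_labels, bg_class=(0,)):
--     fw = list(frame_wise_labels)
--     n = len(fw)
--     change = [a != b for a, b in zip(fw, fw[1:])]
--     start_flag = [True] + change          # a run begins at index i
--     end_flag = change + [True]            # a run ends after index i
--     start_idx = [i for i in range(n) if start_flag[i] and fw[i] not in bg_class]
--     labels = [fw[i] for i in start_idx]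
--     ends = [i + 1 for i in range(n) if end_flag[i] and fw[i] not in bg_class]
--     return labels, start_idx, ends
-- ===== Notes on version B (the rewrite author's own statement) =====
-- stated objective: alternative
-- what changed: B computes boundary flags once by zipping the sequence with its own tail, then derives starts, labels and ends as three independent index-filter comprehensions over range(n), instead of A's single stateful pass that appends to the three lists at run transitions.
import Mathlib
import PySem

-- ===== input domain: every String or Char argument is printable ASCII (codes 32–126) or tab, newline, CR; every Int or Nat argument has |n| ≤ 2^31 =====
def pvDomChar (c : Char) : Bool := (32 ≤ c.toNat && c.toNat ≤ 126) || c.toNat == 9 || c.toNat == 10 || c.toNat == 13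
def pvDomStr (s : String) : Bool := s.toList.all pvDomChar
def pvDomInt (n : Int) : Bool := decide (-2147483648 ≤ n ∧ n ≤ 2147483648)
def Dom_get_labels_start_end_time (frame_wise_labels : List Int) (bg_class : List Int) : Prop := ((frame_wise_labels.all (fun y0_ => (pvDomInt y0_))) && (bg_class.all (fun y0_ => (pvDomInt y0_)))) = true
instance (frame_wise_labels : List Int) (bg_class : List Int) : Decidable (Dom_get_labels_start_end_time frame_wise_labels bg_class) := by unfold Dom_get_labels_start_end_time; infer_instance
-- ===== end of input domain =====

-- B replaces A's stateful boundary pass by zip-derived boundary flags and three independent index-filter comprehensions (alternative decomposition, same O(n) cost).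


-- ===== PORT A =====
-- enumerate(frame_wise_labels) (Python ints → Int)
def pvEnum (i : Int) : List Int → List (Int × Int)
  | [] => []
  | x :: xs => (i, x) :: pvEnum (i + 1) xs

-- the body of A's for-loop over (i, label), state = (labels, starts, ends, last_label)
def pvAStep (bg : List Int) (st : List Int × List Int × List Int × Int)
    (p : Int × Int) : List Int × List Int × List Int × Int :=
  match st, p with
  | (labels, starts, ends, last), (i, label) =>
    if label ≠ last then
      ((if label ∈ bg then labels else labels ++ [label]),
       (if label ∈ bg then starts else starts ++ [i]),
       (if last ∈ bg then ends else ends ++ [i]),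
       label)
    else (labels, starts, ends, last)

def get_labels_start_end_time (frame_wise_labels : List Int) (bg_class : List Int) :
    List Int × List Int × List Int :=
  match frame_wise_labels with
  | [] => ([], [], [])  -- Python raises IndexError at frame_wise_labels[0]; excluded by Pre_
  | x :: _ =>
    -- last_label = frame_wise_labels[0]; initial appends for the first frame
    let labels : List Int := if x ∈ bg_class then [] else [x]
    let starts : List Int := if x ∈ bg_class then [] else [0]
    match (pvEnum 0 frame_wise_labels).foldl (pvAStep bg_class) (labels, starts, [], x) with
    | (labels, starts, ends, last) =>
      -- the final `i + 1` equals len(frame_wise_labels): i ends at len − 1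
      (labels, starts, if last ∈ bg_class then ends else ends ++ [(frame_wise_labels.length : Int)])

-- ===== PORT B =====
-- change = [a != b for a, b in zip(fw, fw[1:])]
def pvChange (fw : List Int) : List Bool :=
  List.zipWith (fun a b => decide (a ≠ b)) fw fw.tail

def get_labels_start_end_time_alt (frame_wise_labels : List Int) (bg_class : List Int) :
    List Int × List Int × List Int :=
  let n := frame_wise_labels.length
  let change := pvChange frame_wise_labels
  let start_flag := true :: change
  let end_flag := change ++ [true]
  -- start_idx = [i for i in range(n) if start_flag[i] and fw[i] not in bg_class]
  -- (indices produced by range(n) are in bounds, so getD is exact here)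
  let start_idx := (List.range n).filter
    (fun i => start_flag.getD i false && !(bg_class.contains (frame_wise_labels.getD i 0)))
  let labels := start_idx.map (fun i => frame_wise_labels.getD i 0)
  let starts := start_idx.map (fun i : Nat => (i : Int))
  let ends := ((List.range n).filter
      (fun i => end_flag.getD i false && !(bg_class.contains (frame_wise_labels.getD i 0)))).map
    (fun i : Nat => ((i : Int) + 1))
  (labels, starts, ends)

-- ===== PRECONDITION & SPEC =====
-- Pre_ excludes only the empty frame list, on which A raises IndexError.
def Pre_get_labels_start_end_time (frame_wise_labels : List Int) (_bg_class : List Int) : Prop :=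
  frame_wise_labels ≠ []
instance (frame_wise_labels : List Int) (bg_class : List Int) : Decidable (Pre_get_labels_start_end_time frame_wise_labels bg_class) := by unfold Pre_get_labels_start_end_time; infer_instance
def pvWitness_get_labels_start_end_time : List Int × List Int := ([1, 1, 0, 2], [0])

def Spec_get_labels_start_end_time (frame_wise_labels : List Int) (bg_class : List Int) (out : List Int × List Int × List Int) : Prop := out = get_labels_start_end_time_alt frame_wise_labels bg_class
instance (frame_wise_labels : List Int) (bg_class : List Int) (out : List Int × List Int × List Int) : Decidable (Spec_get_labels_start_end_time frame_wise_labels bg_class out) := by unfold Spec_get_labels_start_end_time; infer_instance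

-- ===== CLAIM (what is proved, stated in full; the proofs are below) =====
def Claim_equal_get_labels_start_end_time : Prop := ∀ (frame_wise_labels : List Int) (bg_class : List Int), Dom_get_labels_start_end_time frame_wise_labels bg_class → Pre_get_labels_start_end_time frame_wise_labels bg_class → Spec_get_labels_start_end_time frame_wise_labels bg_class (get_labels_start_end_time frame_wise_labels bg_class)

-- ===== LEMMAS AND PROOFS =====
-- common recursive characterisation of the three result lists (prev = previous frame label)
def sLabels (bg : List Int) (prev : Int) : List Int → List Int
  | [] => []
  | y :: ys => (if y ≠ prev ∧ y ∉ bg then [y] else []) ++ sLabels bg y ys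

def sStarts (bg : List Int) (prev : Int) (i : Int) : List Int → List Int
  | [] => []
  | y :: ys => (if y ≠ prev ∧ y ∉ bg then [i] else []) ++ sStarts bg y (i + 1) ys

def sEnds (bg : List Int) (prev : Int) (i : Int) : List Int → List Int
  | [] => if prev ∈ bg then [] else [i]
  | y :: ys => (if y ≠ prev ∧ prev ∉ bg then [i] else []) ++ sEnds bg y (i + 1) ys

-- finalize A's loop state: append the final end at index n if the last label is foreground
def pvAfinish (bg : List Int) (st : List Int × List Int × List Int × Int) (n : Int) :
    List Int × List Int × List Int :=
  match st with
  | (L, S, E, last) => (L, S, if last ∈ bg then E else E ++ [n])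

theorem A_fold (bg : List Int) : ∀ (xs : List Int) (prev : Int) (i : Int) (L S E : List Int),
    pvAfinish bg ((pvEnum i xs).foldl (pvAStep bg) (L, S, E, prev)) (i + (xs.length : Int))
      = (L ++ sLabels bg prev xs, S ++ sStarts bg prev i xs, E ++ sEnds bg prev i xs) := by
  intro xs
  induction xs with
  | nil =>
    intro prev i L S E
    by_cases h : prev ∈ bg <;> simp [pvEnum, pvAfinish, sLabels, sStarts, sEnds, h]
  | cons y ys ih =>
    intro prev i L S E
    have harith : i + ((ys.length + 1 : Nat) : Int) = (i + 1) + (ys.length : Int) := by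
      push_cast; ring
    by_cases h : y = prev
    · subst h
      simp only [pvEnum, List.foldl_cons, pvAStep, ne_eq, not_true_eq_false, if_false,
        List.length_cons, harith, sLabels, sStarts, sEnds, false_and,
        List.nil_append]
      simpa using ih y (i + 1) L S E
    · have hstep := ih y (i + 1)
        (if y ∈ bg then L else L ++ [y]) (if y ∈ bg then S else S ++ [i])
        (if prev ∈ bg then E else E ++ [i])
      simp only [pvEnum, List.foldl_cons, pvAStep, ne_eq, h, not_false_eq_true, if_true,
        List.length_cons, harith, sLabels, sStarts, sEnds] at hstep ⊢
      rw [hstep]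
      by_cases hy : y ∈ bg <;> by_cases hp : prev ∈ bg <;>
        simp [hy, hp, List.append_assoc]

-- peel index 0 off a filter/map over range (m+1)
theorem pvFMR {α : Type} (m : Nat) (p : Nat → Bool) (f : Nat → α) :
    ((List.range (m + 1)).filter p).map f
      = (if p 0 then [f 0] else [])
        ++ ((List.range m).filter (fun j => p (j + 1))).map (fun j => f (j + 1)) := by
  rw [List.range_succ_eq_map, List.filter_cons]
  by_cases h : p 0 = true <;>
  · simp only [h, if_true, if_false, List.map_cons, List.filter_map, List.map_map,
      Bool.false_eq_true, List.nil_append]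
    rfl

-- the boolean run-boundary condition equals the propositional one of the spec
theorem pvCond (bg : List Int) (prev y : Int) :
    (decide (prev ≠ y) && !(bg.contains y)) = decide (y ≠ prev ∧ y ∉ bg) := by
  by_cases h1 : y = prev
  · subst h1; simp
  · have h1' : prev ≠ y := fun hh => h1 hh.symm
    by_cases h2 : y ∈ bg <;> simp [h1, h1', h2]

theorem B_starts (bg : List Int) : ∀ (xs : List Int) (prev : Int) (k : Int),
    (((List.range xs.length).filter
        (fun j => (List.zipWith (fun a b => decide (a ≠ b)) (prev :: xs) xs).getD j false
          && !(bg.contains (xs.getD j 0)))).map (fun j : Nat => k + (j : Int)) = sStarts bg prev k xs)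
    ∧ (((List.range xs.length).filter
        (fun j => (List.zipWith (fun a b => decide (a ≠ b)) (prev :: xs) xs).getD j false
          && !(bg.contains (xs.getD j 0)))).map (fun j : Nat => xs.getD j 0) = sLabels bg prev xs) := by
  intro xs
  induction xs with
  | nil => intro prev k; simp [sStarts, sLabels]
  | cons y ys ih =>
    intro prev k
    have ihy := ih y (k + 1)
    have hpred : (fun j => ((List.zipWith (fun a b => decide (a ≠ b)) (prev :: y :: ys)
          (y :: ys)).getD (j + 1) false && !(bg.contains ((y :: ys).getD (j + 1) 0))))
        = (fun j => (List.zipWith (fun a b => decide (a ≠ b)) (y :: ys) ys).getD j false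
          && !(bg.contains (ys.getD j 0))) := by
      funext j; simp
    constructor
    · rw [List.length_cons, pvFMR]
      simp only [hpred]
      have hf : (fun j : Nat => k + ((j + 1 : Nat) : Int)) = (fun j : Nat => (k + 1) + (j : Int)) := by
        funext j; push_cast; ring
      rw [hf, ihy.1]
      simp only [List.zipWith_cons_cons, List.getD_cons_zero, List.getD_cons_zero, pvCond,
        sStarts, Nat.cast_zero, add_zero, decide_eq_true_eq]
    · rw [List.length_cons, pvFMR]
      simp only [hpred]
      have hf : (fun j : Nat => (y :: ys).getD (j + 1) 0) = (fun j : Nat => ys.getD j 0) := by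
        funext j; simp
      rw [hf, ihy.2]
      simp only [List.zipWith_cons_cons, List.getD_cons_zero, pvCond,
        sLabels, decide_eq_true_eq]

theorem B_ends (bg : List Int) : ∀ (xs : List Int) (y : Int) (k : Int),
    ((List.range (xs.length + 1)).filter
        (fun j => ((List.zipWith (fun a b => decide (a ≠ b)) (y :: xs) xs) ++ [true]).getD j false
          && !(bg.contains ((y :: xs).getD j 0)))).map (fun j : Nat => k + (j : Int) + 1)
      = sEnds bg y (k + 1) xs := by
  intro xs
  induction xs with
  | nil =>
    intro y k
    by_cases h : y ∈ bg <;> simp [sEnds, h]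
  | cons z t ih =>
    intro y k
    rw [pvFMR]
    have hpred : (fun j => ((List.zipWith (fun a b => decide (a ≠ b)) (y :: z :: t) (z :: t)
          ++ [true]).getD (j + 1) false && !(bg.contains ((y :: z :: t).getD (j + 1) 0))))
        = (fun j => ((List.zipWith (fun a b => decide (a ≠ b)) (z :: t) t ++ [true]).getD j false
          && !(bg.contains ((z :: t).getD j 0)))) := by
      funext j; simp
    simp only [hpred]
    have hf : (fun j : Nat => k + ((j + 1 : Nat) : Int) + 1)
        = (fun j : Nat => (k + 1) + (j : Int) + 1) := by
      funext j; push_cast; ring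
    simp only [List.length_cons]
    rw [hf, ih z (k + 1)]
    have hcond : ((List.zipWith (fun a b => decide (a ≠ b)) (y :: z :: t) (z :: t)
        ++ [true]).getD 0 false && !(bg.contains ((y :: z :: t).getD 0 0)))
        = decide (z ≠ y ∧ y ∉ bg) := by
      have hyz : (¬ y = z) ↔ (¬ z = y) := ⟨fun h hh => h hh.symm, fun h hh => h hh.symm⟩
      by_cases h1 : y = z
      · subst h1; simp
      · by_cases h2 : y ∈ bg <;> simp [h1, h2, hyz.mp h1, List.contains_iff_mem]
    rw [hcond]
    simp only [sEnds, Nat.cast_zero, add_zero, decide_eq_true_eq]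

theorem alt_eq_spec (bg : List Int) (x : Int) (xs : List Int) :
    get_labels_start_end_time_alt (x :: xs) bg
      = ((if x ∈ bg then [] else [x]) ++ sLabels bg x xs,
         (if x ∈ bg then [] else [(0 : Int)]) ++ sStarts bg x 1 xs,
         sEnds bg x 1 xs) := by
  have hpred : (fun j => ((true :: List.zipWith (fun a b => decide (a ≠ b)) (x :: xs) xs).getD
        (j + 1) false && !(bg.contains ((x :: xs).getD (j + 1) 0))))
      = (fun j => (List.zipWith (fun a b => decide (a ≠ b)) (x :: xs) xs).getD j false
        && !(bg.contains (xs.getD j 0))) := by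
    funext j; simp
  have h1 : (List.map (fun i : Nat => (x :: xs).getD i 0)
      (List.filter
        (fun i => (true :: List.zipWith (fun a b => decide (a ≠ b)) (x :: xs) xs).getD i false
          && !(bg.contains ((x :: xs).getD i 0)))
        (List.range (xs.length + 1))))
      = (if x ∈ bg then [] else [x]) ++ sLabels bg x xs := by
    rw [pvFMR]
    simp only [hpred]
    have hf : (fun j : Nat => (x :: xs).getD (j + 1) 0) = (fun j : Nat => xs.getD j 0) := by
      funext j; simp
    rw [hf, (B_starts bg xs x 1).2]
    by_cases hx : x ∈ bg <;> simp [hx]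
  have h2 : (List.map (fun i : Nat => (i : Int))
      (List.filter
        (fun i => (true :: List.zipWith (fun a b => decide (a ≠ b)) (x :: xs) xs).getD i false
          && !(bg.contains ((x :: xs).getD i 0)))
        (List.range (xs.length + 1))))
      = (if x ∈ bg then [] else [(0 : Int)]) ++ sStarts bg x 1 xs := by
    rw [pvFMR]
    simp only [hpred]
    have hf : (fun j : Nat => ((j + 1 : Nat) : Int)) = (fun j : Nat => (1 : Int) + (j : Int)) := by
      funext j; push_cast; ring
    rw [hf, (B_starts bg xs x 1).1]
    by_cases hx : x ∈ bg <;> simp [hx]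
  have h3 : (List.map (fun i : Nat => ((i : Int) + 1))
      (List.filter
        (fun i => (List.zipWith (fun a b => decide (a ≠ b)) (x :: xs) xs ++ [true]).getD i false
          && !(bg.contains ((x :: xs).getD i 0)))
        (List.range (xs.length + 1))))
      = sEnds bg x 1 xs := by
    have hf : (fun j : Nat => ((j : Int) + 1)) = (fun j : Nat => (0 : Int) + (j : Int) + 1) := by
      funext j; ring
    rw [hf, B_ends bg xs x 0]
    norm_num
  simp only [get_labels_start_end_time_alt, pvChange, List.tail_cons, List.length_cons]
  rw [h1, h2, h3]

-- ===== VERDICT (by name: the statement is the Claim_ definition above) =====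
theorem get_labels_start_end_time_spec : Claim_equal_get_labels_start_end_time := by
  intro fw bg _ hpre
  unfold Spec_get_labels_start_end_time
  match fw with
  | [] => exact absurd rfl hpre
  | x :: xs =>
    have hA : get_labels_start_end_time (x :: xs) bg
        = pvAfinish bg ((pvEnum 0 (x :: xs)).foldl (pvAStep bg)
            ((if x ∈ bg then [] else [x]), (if x ∈ bg then [] else [(0 : Int)]), [], x))
          (((x :: xs).length : Int)) := rfl
    have hstep : (pvEnum 0 (x :: xs)).foldl (pvAStep bg)
          ((if x ∈ bg then [] else [x]), (if x ∈ bg then [] else [(0 : Int)]), [], x)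
        = (pvEnum 1 xs).foldl (pvAStep bg)
          ((if x ∈ bg then [] else [x]), (if x ∈ bg then [] else [(0 : Int)]), [], x) := by
      simp [pvEnum, pvAStep]
    have e : ((x :: xs).length : Int) = 1 + (xs.length : Int) := by
      simp [List.length_cons]; ring
    rw [hA, hstep, e, A_fold bg xs x 1, alt_eq_spec]
    simp
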